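-- pv_equiv track=rewrite | github.com/bogumilap/Postquantum-Cryptography | picnic_impl.py | partity
-- ===== SOURCE A (Python) =====
-- from typing import List
--
-- def partity(data: List[int], len: int) -> int:
--     x = data[0]
--
--     for i in range(1, len):
--         x ^= data[i]
--
--     y = x ^ (x >> 1)
--     y ^= (y >> 2)
--     y ^= (y >> 4)
--     y ^= (y >> 8)
--     y ^= (y >> 16)
--     return y & 1
-- ===== SOURCE B (Python) =====
-- def _bitpar(v):
--     # parity of the low 32 bits of v
--     m = v & 0xFFFFFFFF
--     p = 0
--     while m:
--         p ^= m & 1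
--         m >>= 1
--     return p
--
-- def partity(data, len):
--     # parity of a XOR is the XOR of the parities: keep one parity bit per element
--     p = _bitpar(data[0])
--     for i in range(1, len):
--         p ^= _bitpar(data[i])
--     return p
-- ===== Notes on version B (the rewrite author's own statement) =====
-- stated objective: alternative
-- what changed: B replaces A's wide XOR register plus 5-step shift/xor bit fold by maintaining a single parity bit: each element's low 32 bits are reduced to one parity bit by a shift loop and those bits are XORed together (parity of a XOR is the XOR of parities).
import Mathlib
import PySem

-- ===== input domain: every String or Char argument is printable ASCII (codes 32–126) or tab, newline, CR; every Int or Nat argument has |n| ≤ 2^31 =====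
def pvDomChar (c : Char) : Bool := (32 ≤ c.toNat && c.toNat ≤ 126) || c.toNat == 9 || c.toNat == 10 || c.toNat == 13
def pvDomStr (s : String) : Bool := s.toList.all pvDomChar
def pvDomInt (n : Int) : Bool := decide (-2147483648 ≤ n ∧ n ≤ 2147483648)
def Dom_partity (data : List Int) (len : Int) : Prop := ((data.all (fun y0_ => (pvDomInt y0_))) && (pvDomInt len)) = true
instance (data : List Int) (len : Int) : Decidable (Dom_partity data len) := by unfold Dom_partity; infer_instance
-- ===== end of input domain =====

-- B keeps one parity bit per element (parity of a XOR is the XOR of the parities)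
-- instead of A's wide XOR register followed by the 5-step shift/xor bit fold (objective: alternative).

-- ===== PORT A =====
-- x = data[0]; for i in range(1, len): x ^= data[i]; then the 5-step fold; return y & 1
def partity (data : List Int) (len : Int) : Int :=
  let x0 := (PySem.List.pyGet? data 0).getD 0
  let x := (PySem.List.pyRange 1 len 1).foldl
    (fun x i => PySem.Int.bxor x ((PySem.List.pyGet? data i).getD 0)) x0
  let y1 := PySem.Int.bxor x (x >>> (1 : Nat))
  let y2 := PySem.Int.bxor y1 (y1 >>> (2 : Nat))
  let y3 := PySem.Int.bxor y2 (y2 >>> (4 : Nat))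
  let y4 := PySem.Int.bxor y3 (y3 >>> (8 : Nat))
  let y5 := PySem.Int.bxor y4 (y4 >>> (16 : Nat))
  PySem.Int.band y5 1

-- ===== PORT B =====
-- the while loop of _bitpar: p ^= m & 1; m >>= 1   (m = v & 0xFFFFFFFF is nonnegative, so m : Nat)
def bitparGo (p : Int) (m : Nat) : Int :=
  if m = 0 then p else bitparGo (PySem.Int.bxor p ((m &&& 1 : Nat) : Int)) (m >>> 1)
termination_by m
decreasing_by simp only [Nat.shiftRight_one]; omega

-- _bitpar(v): parity of the low 32 bits of v
def bitpar (v : Int) : Int := bitparGo 0 ((PySem.Int.band v 4294967295).toNat)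

def partity_alt (data : List Int) (len : Int) : Int :=
  let p0 := bitpar ((PySem.List.pyGet? data 0).getD 0)
  (PySem.List.pyRange 1 len 1).foldl
    (fun p i => PySem.Int.bxor p (bitpar ((PySem.List.pyGet? data i).getD 0))) p0

-- ===== PRECONDITION & SPEC =====
-- Pre_ excludes exactly the inputs on which A raises IndexError: empty data (data[0])
-- or len exceeding the number of elements (data[i] for some i in range(1, len)).
def Pre_partity (data : List Int) (len : Int) : Prop :=
  data ≠ [] ∧ len ≤ (data.length : Int)
instance (data : List Int) (len : Int) : Decidable (Pre_partity data len) := by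
  unfold Pre_partity; infer_instance

def pvWitness_partity : List Int × Int := ([5, -3, 7], 3)

def Spec_partity (data : List Int) (len : Int) (out : Int) : Prop := out = partity_alt data len
instance (data : List Int) (len : Int) (out : Int) : Decidable (Spec_partity data len out) := by
  unfold Spec_partity; infer_instance

-- ===== CLAIM (what is proved, stated in full; the proofs are below) =====
def Claim_equal_partity : Prop := ∀ (data : List Int) (len : Int),
  Dom_partity data len → Pre_partity data len → Spec_partity data len (partity data len)

-- ===== LEMMAS AND PROOFS =====

-- parity of the low 32 bits of an Int
def P32 (x : Int) : Bool := (List.range 32).foldr (fun i b => xor (x.testBit i) b) false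

-- bxor computes bitwise xor (two's complement), bit by bit
theorem testBit_bxor (a b : Int) (i : Nat) :
    (PySem.Int.bxor a b).testBit i = xor (a.testBit i) (b.testBit i) := by
  have hns : ∀ n : ℕ, ¬ (0:ℤ) ≤ Int.negSucc n := by
    intro n; rw [Int.negSucc_eq]; omega
  have hts : ∀ n : ℕ, (-(Int.negSucc n) - 1).toNat = n := by
    intro n; rw [Int.negSucc_eq]; omega
  cases a with
  | ofNat m =>
    cases b with
    | ofNat n =>
        have h : PySem.Int.bxor (Int.ofNat m) (Int.ofNat n) = Int.ofNat (m ^^^ n) := by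
          simp only [PySem.Int.bxor, Int.ofNat_eq_natCast, if_pos (Int.natCast_nonneg m),
            if_pos (Int.natCast_nonneg n), Int.toNat_natCast]
        rw [h]; simp [Int.testBit, Nat.testBit_xor]
    | negSucc n =>
        have h : PySem.Int.bxor (Int.ofNat m) (Int.negSucc n) = Int.negSucc (m ^^^ n) := by
          simp only [PySem.Int.bxor, Int.ofNat_eq_natCast, if_pos (Int.natCast_nonneg m),
            if_neg (hns n), hts n, Int.toNat_natCast]
          rw [Int.negSucc_eq]; ring
        rw [h]; simp only [Int.testBit, Nat.testBit_xor]
        cases m.testBit i <;> cases n.testBit i <;> rfl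
  | negSucc m =>
    cases b with
    | ofNat n =>
        have h : PySem.Int.bxor (Int.negSucc m) (Int.ofNat n) = Int.negSucc (m ^^^ n) := by
          simp only [PySem.Int.bxor, Int.ofNat_eq_natCast, if_neg (hns m),
            if_pos (Int.natCast_nonneg n), hts m, Int.toNat_natCast]
          rw [Int.negSucc_eq]; ring
        rw [h]; simp only [Int.testBit, Nat.testBit_xor]
        cases m.testBit i <;> cases n.testBit i <;> rfl
    | negSucc n =>
        have h : PySem.Int.bxor (Int.negSucc m) (Int.negSucc n) = Int.ofNat (m ^^^ n) := by
          simp only [PySem.Int.bxor, if_neg (hns m), if_neg (hns n), hts m, hts n,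
            Int.ofNat_eq_natCast]
        rw [h]; simp only [Int.testBit, Nat.testBit_xor]
        cases m.testBit i <;> cases n.testBit i <;> rfl

-- x >> k reads bit i+k
theorem testBit_shiftRight_int (x : Int) (k i : Nat) :
    (x >>> k).testBit i = x.testBit (i + k) := by
  cases x with
  | ofNat n =>
      show (Int.ofNat (n >>> k)).testBit i = _
      simp [Int.testBit, Nat.testBit_shiftRight, Nat.add_comm]
  | negSucc n =>
      show (Int.negSucc (n >>> k)).testBit i = _
      simp [Int.testBit, Nat.testBit_shiftRight, Nat.add_comm]

-- y & 1 reads bit 0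
theorem band_one_eq (y : Int) : PySem.Int.band y 1 = if y.testBit 0 then 1 else 0 := by
  cases y with
  | ofNat n =>
      have h : PySem.Int.band (Int.ofNat n) 1 = Int.ofNat (n &&& 1) := by
        have h1 : ((1:ℤ)).toNat = 1 := rfl
        simp only [PySem.Int.band, Int.ofNat_eq_natCast, if_pos (Int.natCast_nonneg n),
          if_pos (by omega : (0:ℤ) ≤ 1), Int.toNat_natCast, h1]
      rw [h, Nat.and_one_is_mod]
      simp only [Int.testBit, Int.ofNat_eq_natCast, Nat.testBit_zero]
      rcases Nat.mod_two_eq_zero_or_one n with h2 | h2 <;> simp [h2]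
  | negSucc n =>
      have hns : ¬ (0:ℤ) ≤ Int.negSucc n := by rw [Int.negSucc_eq]; omega
      have hts : (-(Int.negSucc n) - 1).toNat = n := by rw [Int.negSucc_eq]; omega
      have h : PySem.Int.band (Int.negSucc n) 1 = Int.ofNat (1 - (1 &&& n)) := by
        simp only [PySem.Int.band, if_neg hns, if_pos (by omega : (0:ℤ) ≤ 1), hts,
          Int.ofNat_eq_natCast]
        rfl
      rw [h]
      have h1 : (1 &&& n) = n % 2 := by rw [Nat.land_comm, Nat.and_one_is_mod]
      rw [h1]
      simp only [Int.testBit, Nat.testBit_zero]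
      rcases Nat.mod_two_eq_zero_or_one n with h2 | h2 <;> simp [h2]

-- the masked value, by sign of v
theorem band_mask_cases (v : Int) :
    (PySem.Int.band v 4294967295).toNat
      = if 0 ≤ v then v.toNat &&& (2^32 - 1) else (2^32 - 1) - ((-v - 1).toNat % 2^32) := by
  have hm : ((4294967295:ℤ)).toNat = 2^32 - 1 := by norm_num; rfl
  by_cases h : 0 ≤ v
  · simp only [PySem.Int.band, if_pos h, if_pos (by norm_num : (0:ℤ) ≤ 4294967295), hm,
      Int.toNat_natCast]
  · simp only [PySem.Int.band, if_neg h, if_pos (by norm_num : (0:ℤ) ≤ 4294967295), hm,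
      Int.toNat_natCast]
    rw [Nat.land_comm, Nat.and_two_pow_sub_one_eq_mod]

theorem band_mask_lt (v : Int) : (PySem.Int.band v 4294967295).toNat < 2 ^ 32 := by
  rw [band_mask_cases]
  split_ifs
  · exact Nat.lt_of_le_of_lt Nat.and_le_right (by omega)
  · omega

-- bits of (v & 0xFFFFFFFF).toNat
theorem testBit_band_mask (v : Int) (i : Nat) :
    ((PySem.Int.band v 4294967295).toNat).testBit i = (v.testBit i && decide (i < 32)) := by
  rw [band_mask_cases]
  by_cases h : 0 ≤ v
  · rw [if_pos h, Nat.testBit_land, Nat.testBit_two_pow_sub_one]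
    congr 1
    cases v with
    | ofNat n => simp [Int.testBit]
    | negSucc n => exact absurd h (by rw [Int.negSucc_eq]; omega)
  · rw [if_neg h]
    cases v with
    | ofNat n => exact absurd (Int.natCast_nonneg n) (by simp only [Int.ofNat_eq_natCast] at h; exact h)
    | negSucc n =>
        have hts : (-(Int.negSucc n) - 1).toNat = n := by rw [Int.negSucc_eq]; omega
        rw [hts]
        have hr : n % 2^32 < 2^32 := Nat.mod_lt _ (by norm_num)
        have h32 : (2^32 - 1) - (n % 2^32) = 2^32 - ((n % 2^32) + 1) := by omega
        rw [h32, Nat.testBit_two_pow_sub_succ hr, Nat.testBit_mod_two_pow]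
        simp only [Int.testBit]
        cases hd : decide (i < 32) <;> cases hb : n.testBit i <;> simp

-- bit-parity of a Nat, low bit first
def Npar (m : Nat) : Bool :=
  if m = 0 then false else xor (decide (m % 2 = 1)) (Npar (m / 2))
termination_by m
decreasing_by omega

theorem foldr_keep (l : List Nat) : l.foldr (fun _ b => b) false = false := by
  induction l with
  | nil => rfl
  | cons a l ih => simp only [List.foldr_cons]; exact ih

theorem Npar_eq_fold : ∀ (k m : Nat), m < 2 ^ k →
    Npar m = (List.range k).foldr (fun i b => xor (m.testBit i) b) false := by
  intro k
  induction k with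
  | zero =>
      intro m hm
      interval_cases m
      rw [Npar]; rfl
  | succ k ih =>
      intro m hm
      by_cases h0 : m = 0
      · subst h0
        rw [Npar]
        simp only [Nat.zero_testBit]
        rw [← foldr_keep (List.range (k+1))]
        simp
      · rw [Npar, if_neg h0]
        rw [List.range_succ_eq_map, List.foldr_cons, List.foldr_map]
        have hdiv : m / 2 < 2 ^ k := by
          have : (2:ℕ) ^ (k+1) = 2 * 2 ^ k := by ring
          omega
        rw [ih (m / 2) hdiv]
        simp only [Nat.testBit_zero, Nat.testBit_succ]

theorem bitparGo_spec : ∀ (m : Nat) (b : Bool),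
    bitparGo (if b then 1 else 0) m = if xor b (Npar m) then 1 else 0 := by
  intro m
  induction m using Nat.strong_induction_on with
  | _ m ih =>
    intro b
    by_cases h0 : m = 0
    · subst h0
      rw [bitparGo, Npar]
      simp
    · rw [bitparGo, if_neg h0, Npar, if_neg h0]
      have hand : (m &&& 1) = m % 2 := Nat.and_one_is_mod m
      have hsh : m >>> 1 = m / 2 := Nat.shiftRight_one m
      have hlt : m / 2 < m := by omega
      rcases Nat.mod_two_eq_zero_or_one m with h2 | h2
      · have hx : PySem.Int.bxor (if b then 1 else 0) ((m &&& 1 : Nat) : Int)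
            = if b then 1 else 0 := by
          rw [hand, h2]; cases b <;> simp
        rw [hx, hsh, ih (m / 2) hlt b, h2]
        simp
      · have hx : PySem.Int.bxor (if b then 1 else 0) ((m &&& 1 : Nat) : Int)
            = if !b then 1 else 0 := by
          rw [hand, h2]; cases b <;> decide
        rw [hx, hsh, ih (m / 2) hlt (!b), h2]
        cases b <;> cases hnp : Npar (m / 2) <;> simp

theorem bitpar_eq (v : Int) : bitpar v = if P32 v then 1 else 0 := by
  have h0 : bitpar v
      = bitparGo (if false then 1 else 0) ((PySem.Int.band v 4294967295).toNat) := rfl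
  rw [h0, bitparGo_spec, Npar_eq_fold 32 _ (band_mask_lt v)]
  simp only [Bool.false_xor]
  congr 1
  unfold P32
  simp [List.range_succ, testBit_band_mask]

theorem foldr_xor_split (f g : Nat → Bool) : ∀ l : List Nat,
    l.foldr (fun i b => xor (xor (f i) (g i)) b) false
      = xor (l.foldr (fun i b => xor (f i) b) false) (l.foldr (fun i b => xor (g i) b) false) := by
  intro l
  induction l with
  | nil => rfl
  | cons a l ih =>
      simp only [List.foldr_cons, ih]
      cases f a <;> cases g a <;> simp

theorem P32_bxor (a b : Int) : P32 (PySem.Int.bxor a b) = xor (P32 a) (P32 b) := by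
  unfold P32
  simp only [testBit_bxor]
  exact foldr_xor_split _ _ _

-- parity of the bit window [i, i+n) of x
def W (x : Int) : Nat → Nat → Bool
  | _, 0 => false
  | i, n+1 => xor (x.testBit i) (W x (i+1) n)

theorem W_add (x : Int) : ∀ (n i m : Nat), W x i (n + m) = xor (W x i n) (W x (i + n) m) := by
  intro n
  induction n with
  | zero => intro i m; simp [W]
  | succ n ih =>
      intro i m
      have h : n + 1 + m = (n + m) + 1 := by omega
      rw [h]
      show xor (x.testBit i) (W x (i+1) (n + m)) = _
      rw [ih (i+1) m]
      show _ = xor (xor (x.testBit i) (W x (i+1) n)) (W x (i + (n+1)) m)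
      have h2 : i + 1 + n = i + (n + 1) := by omega
      rw [h2, Bool.xor_assoc]

theorem step_lemma {x y : Int} {s : Nat} (h : ∀ i, y.testBit i = W x i s) (i : Nat) :
    (PySem.Int.bxor y (y >>> s)).testBit i = W x i (s + s) := by
  rw [testBit_bxor, testBit_shiftRight_int, h, h, W_add x s i s]

theorem base_lemma (x : Int) (i : Nat) : x.testBit i = W x i 1 := by simp [W]

-- the 5-step fold of A extracts exactly the parity of the low 32 bits
set_option maxHeartbeats 1000000 in
theorem fin_eq (x : Int) :
    (PySem.Int.band
      (PySem.Int.bxor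
        (PySem.Int.bxor
          (PySem.Int.bxor
            (PySem.Int.bxor (PySem.Int.bxor x (x >>> (1:Nat)))
              ((PySem.Int.bxor x (x >>> (1:Nat))) >>> (2:Nat)))
            ((PySem.Int.bxor (PySem.Int.bxor x (x >>> (1:Nat)))
              ((PySem.Int.bxor x (x >>> (1:Nat))) >>> (2:Nat))) >>> (4:Nat)))
          ((PySem.Int.bxor
            (PySem.Int.bxor (PySem.Int.bxor x (x >>> (1:Nat)))
              ((PySem.Int.bxor x (x >>> (1:Nat))) >>> (2:Nat)))
            ((PySem.Int.bxor (PySem.Int.bxor x (x >>> (1:Nat)))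
              ((PySem.Int.bxor x (x >>> (1:Nat))) >>> (2:Nat))) >>> (4:Nat))) >>> (8:Nat)))
        ((PySem.Int.bxor
          (PySem.Int.bxor
            (PySem.Int.bxor (PySem.Int.bxor x (x >>> (1:Nat)))
              ((PySem.Int.bxor x (x >>> (1:Nat))) >>> (2:Nat)))
            ((PySem.Int.bxor (PySem.Int.bxor x (x >>> (1:Nat)))
              ((PySem.Int.bxor x (x >>> (1:Nat))) >>> (2:Nat))) >>> (4:Nat)))
          ((PySem.Int.bxor
            (PySem.Int.bxor (PySem.Int.bxor x (x >>> (1:Nat)))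
              ((PySem.Int.bxor x (x >>> (1:Nat))) >>> (2:Nat)))
            ((PySem.Int.bxor (PySem.Int.bxor x (x >>> (1:Nat)))
              ((PySem.Int.bxor x (x >>> (1:Nat))) >>> (2:Nat))) >>> (4:Nat))) >>> (8:Nat))) >>> (16:Nat)))
      1) = if P32 x then 1 else 0 := by
  have h1 : ∀ i, (PySem.Int.bxor x (x >>> (1:Nat))).testBit i = W x i 2 :=
    step_lemma (base_lemma x)
  have h2 := step_lemma (x := x) (s := 2) h1
  have h4 := step_lemma (x := x) (s := 4) h2
  have h8 := step_lemma (x := x) (s := 8) h4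
  have h16 := step_lemma (x := x) (s := 16) h8
  have hw : W x 0 32 = P32 x := by
    unfold P32
    simp [List.range_succ, W]
  rw [band_one_eq, h16 0, hw]

theorem fin_bxor (x v : Int) :
    (if P32 (PySem.Int.bxor x v) then (1:Int) else 0)
      = PySem.Int.bxor (if P32 x then 1 else 0) (bitpar v) := by
  rw [P32_bxor, bitpar_eq]
  cases P32 x <;> cases P32 v <;> norm_num [PySem.Int.bxor]

theorem fold_eq (g : Int → Int) : ∀ (l : List Int) (x : Int),
    (if P32 (l.foldl (fun a i => PySem.Int.bxor a (g i)) x) then (1:Int) else 0)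
      = l.foldl (fun p i => PySem.Int.bxor p (bitpar (g i))) (if P32 x then 1 else 0) := by
  intro l
  induction l with
  | nil => intro x; rfl
  | cons e l ih =>
      intro x
      simp only [List.foldl_cons]
      exact (ih (PySem.Int.bxor x (g e))).trans (by rw [fin_bxor])

-- ===== VERDICT (by name: the statement is the Claim_ definition above) =====
theorem partity_spec : Claim_equal_partity := by
  intro data len _ _
  unfold Spec_partity partity partity_alt
  simp only
  rw [fin_eq, fold_eq, bitpar_eq]
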